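-- pv_equiv track=rewrite | github.com/icecreamgit/GW | mcd_method/MCD_Modified.py | __calibrateInputLenght
-- ===== SOURCE A (Python) =====
-- def __calibrateInputLenght(n, numberZones):
--     h = int(n / numberZones)
--     sampleSizes = [h, h, h, h]
--     i = 0
--     while sum(sampleSizes) < n :
--         sampleSizes[i] += 1
--         i += 1
--         if i >= 4:
--             i = 0
--     return sampleSizes
-- ===== SOURCE B (Python) =====
-- def __calibrateInputLenght(n, numberZones):
--     h = int(n / numberZones)
--     r = n - 4 * h
--     if r <= 0:
--         return [h, h, h, h]
--     q, rem = divmod(r, 4)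
--     return [h + q + (1 if j < rem else 0) for j in range(4)]
-- ===== Notes on version B (the rewrite author's own statement) =====
-- stated objective: faster
-- what changed: The one-at-a-time cyclic incrementing while loop (n - 4h iterations) is replaced by a closed-form divmod distribution of the remainder over the four slots.
import Mathlib
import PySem

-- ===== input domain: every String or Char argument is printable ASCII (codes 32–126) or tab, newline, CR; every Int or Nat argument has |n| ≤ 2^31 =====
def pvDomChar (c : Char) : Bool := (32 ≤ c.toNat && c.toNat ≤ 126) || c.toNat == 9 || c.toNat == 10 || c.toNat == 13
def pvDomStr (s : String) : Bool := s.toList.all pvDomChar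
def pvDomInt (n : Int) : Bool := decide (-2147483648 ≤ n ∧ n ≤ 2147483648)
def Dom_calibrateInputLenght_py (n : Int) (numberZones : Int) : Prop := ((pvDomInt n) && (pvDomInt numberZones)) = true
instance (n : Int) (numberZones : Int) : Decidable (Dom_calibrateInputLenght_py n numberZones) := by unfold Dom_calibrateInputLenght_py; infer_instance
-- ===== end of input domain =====

-- B replaces A's one-increment-per-iteration while loop by a closed-form divmod
-- distribution of the remainder over the four slots (objective: faster).

-- ===== PORT A =====
-- while sum(sampleSizes) < n: sampleSizes[i] += 1; i cycles 0..3.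
-- fuel = (n - 4*h).toNat is exactly the number of iterations (each adds 1 to the sum);
-- the loop's own condition is still checked each step, so this is the same computation made total.
def loopA (n : Int) : Nat → List Int → Nat → List Int
  | 0, s, _ => s
  | fuel + 1, s, i =>
    if s.sum < n then
      loopA n fuel (s.modify i (· + 1)) (if i + 1 ≥ 4 then 0 else i + 1)
    else s

-- int(n / numberZones): float true division then truncation toward zero; on Dom
-- (|n|,|numberZones| ≤ 2^31) the double rounding never crosses an integer, so it equals Int.tdiv.
def calibrateInputLenght_py (n : Int) (numberZones : Int) : List Int :=
  let h := n.tdiv numberZones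
  let sampleSizes := [h, h, h, h]
  loopA n (n - 4 * h).toNat sampleSizes 0

-- ===== PORT B =====
def calibrateInputLenght_py_alt (n : Int) (numberZones : Int) : List Int :=
  let h := n.tdiv numberZones
  let r := n - 4 * h
  if r ≤ 0 then [h, h, h, h]
  else
    let q := PySem.Int.floordiv r 4
    let rem := PySem.Int.mod r 4
    (List.range 4).map (fun (j : Nat) => h + q + if (j : Int) < rem then 1 else 0)

-- ===== PRECONDITION & SPEC =====
-- Pre_ excludes only numberZones = 0, where Python A raises ZeroDivisionError.
def Pre_calibrateInputLenght_py (n : Int) (numberZones : Int) : Prop := numberZones ≠ 0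
instance (n : Int) (numberZones : Int) : Decidable (Pre_calibrateInputLenght_py n numberZones) := by unfold Pre_calibrateInputLenght_py; infer_instance
def pvWitness_calibrateInputLenght_py : Int × Int := (13, 4)

def Spec_calibrateInputLenght_py (n : Int) (numberZones : Int) (out : List Int) : Prop := out = calibrateInputLenght_py_alt n numberZones
instance (n : Int) (numberZones : Int) (out : List Int) : Decidable (Spec_calibrateInputLenght_py n numberZones out) := by unfold Spec_calibrateInputLenght_py; infer_instance

-- ===== CLAIM (what is proved, stated in full; the proofs are below) =====
def Claim_equal_calibrateInputLenght_py : Prop := ∀ (n : Int) (numberZones : Int), Dom_calibrateInputLenght_py n numberZones → Pre_calibrateInputLenght_py n numberZones → Spec_calibrateInputLenght_py n numberZones (calibrateInputLenght_py n numberZones)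

-- ===== LEMMAS AND PROOFS =====

-- Distributing m one-unit increments cyclically from index 0 over [a,a,a,a]
-- (with target n, n - 4a = m) gives the closed-form result.
set_option maxHeartbeats 1000000 in
theorem loop_eval (m : Nat) (a n : Int) (h : n - 4 * a = (m : Int)) :
    loopA n m [a, a, a, a] 0 =
      [a + (m / 4 : Nat) + (if 0 < m % 4 then 1 else 0),
       a + (m / 4 : Nat) + (if 1 < m % 4 then 1 else 0),
       a + (m / 4 : Nat) + (if 2 < m % 4 then 1 else 0),
       a + (m / 4 : Nat) + (if 3 < m % 4 then 1 else 0)] := by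
  match m with
  | 0 => simp [loopA]
  | 1 =>
    simp [loopA, List.modify]
    first | omega | (split_ifs <;> first | rfl | (exfalso; omega))
  | 2 =>
    simp [loopA, List.modify]
    first | omega | (split_ifs <;> first | rfl | (exfalso; omega))
  | 3 =>
    simp [loopA, List.modify]
    first | omega | (split_ifs <;> first | rfl | (exfalso; omega))
  | k + 4 =>
    have ih := loop_eval k (a + 1) n (by push_cast at h ⊢; omega)
    have e1 : (k + 4) / 4 = k / 4 + 1 := by omega
    have e2 : (k + 4) % 4 = k % 4 := by omega
    push_cast at h
    have key : loopA n (k + 4) [a, a, a, a] 0 = loopA n k [a + 1, a + 1, a + 1, a + 1] 0 := by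
      simp [loopA, List.modify]
      split_ifs <;> first | rfl | (exfalso; omega)
    rw [e1, e2, key, ih]
    push_cast
    ring_nf

-- ===== VERDICT (by name: the statement is the Claim_ definition above) =====
theorem calibrateInputLenght_py_spec : Claim_equal_calibrateInputLenght_py := by
  intro n z _ _
  unfold Spec_calibrateInputLenght_py
  simp only [calibrateInputLenght_py, calibrateInputLenght_py_alt]
  set h := n.tdiv z with hh
  by_cases hr : n - 4 * h ≤ 0
  · have h0 : (n - 4 * h).toNat = 0 := by omega
    rw [h0, if_pos hr]
    rfl
  · push_neg at hr
    have hmn : n - 4 * h = ((n - 4 * h).toNat : Int) := by omega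
    rw [if_neg (not_le.mpr hr)]
    rw [loop_eval ((n - 4 * h).toNat) h n hmn]
    have hq : PySem.Int.floordiv (n - 4 * h) 4 = (((n - 4 * h).toNat / 4 : Nat) : Int) := by
      rw [hmn]; exact_mod_cast PySem.Int.floordiv_natCast (n - 4 * h).toNat 4
    have hrem : PySem.Int.mod (n - 4 * h) 4 = (((n - 4 * h).toNat % 4 : Nat) : Int) := by
      rw [hmn]; exact_mod_cast PySem.Int.mod_natCast (n - 4 * h).toNat 4
    have hrange : List.range 4 = [0, 1, 2, 3] := rfl
    rw [hrange, hq, hrem]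
    simp only [List.map, List.cons.injEq, and_true]
    refine ⟨?_, ?_, ?_, ?_⟩ <;> (split_ifs <;> first | rfl | omega)
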